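-- pv_equiv track=rewrite | github.com/HosseinMohammadii/V2Manager | utils/uri.py | is_applicable
-- ===== SOURCE A (Python) =====
-- def is_applicable(protocol, net, apply_on_str):
--     if apply_on_str is None or len(apply_on_str) < 2:
--         return True
--     apply_on_list = apply_on_str.split(",")
--     for apply_on in apply_on_list:
--         if protocol+'-'+net in apply_on:
--             return True
--     return False
-- ===== SOURCE B (Python) =====
-- def is_applicable(protocol, net, apply_on_str):
--     # Single boolean expression: the target protocol+'-'+net contains no comma
--     # (precondition), so whole-string containment equals the per-segment scan.
--     return (apply_on_str is None
--             or len(apply_on_str) < 2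
--             or protocol + '-' + net in apply_on_str)
-- ===== Notes on version B (the rewrite author's own statement) =====
-- stated objective: simpler
-- what changed: B replaces A's guard-then-split-then-loop control flow by one branch-free boolean expression: since the target protocol+'-'+net contains no comma (Pre_ rules out comma-bearing targets that occur in the string), whole-string containment equals the per-segment scan, so the split and the loop disappear.
-- outside the precondition, e.g. on is_applicable('a,b', 'c', 'a,b-c'): A returns False, B returns True
import Mathlib
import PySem

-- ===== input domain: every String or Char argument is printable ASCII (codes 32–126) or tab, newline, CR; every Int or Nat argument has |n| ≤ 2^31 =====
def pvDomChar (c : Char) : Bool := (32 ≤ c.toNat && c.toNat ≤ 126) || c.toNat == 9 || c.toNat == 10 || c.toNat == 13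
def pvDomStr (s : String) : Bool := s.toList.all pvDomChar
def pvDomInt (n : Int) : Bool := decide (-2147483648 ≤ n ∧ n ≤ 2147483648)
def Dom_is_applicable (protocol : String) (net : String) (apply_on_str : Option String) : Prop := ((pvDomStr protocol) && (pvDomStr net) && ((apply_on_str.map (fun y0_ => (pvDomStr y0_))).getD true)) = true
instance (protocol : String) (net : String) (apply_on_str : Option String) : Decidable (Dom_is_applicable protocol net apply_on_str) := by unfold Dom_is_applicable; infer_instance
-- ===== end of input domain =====

-- B replaces A's guard/split/loop by a single branch-free boolean disjunction ending in
-- whole-string containment of protocol+'-'+net (valid because Pre_ rules out commas in the target).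


-- ===== PORT A =====
def is_applicable (protocol : String) (net : String) (apply_on_str : Option String) : Bool :=
  match apply_on_str with
  | none => true
  | some s =>
    if PySem.Str.len s < 2 then true
    else
      let apply_on_list := (PySem.Str.split? s ",").getD []
      -- 'for apply_on in apply_on_list: if … in apply_on: return True' / 'return False'
      apply_on_list.any (fun apply_on => PySem.Str.isIn (protocol ++ "-" ++ net) apply_on)

-- ===== PORT B =====
def is_applicable_alt (protocol : String) (net : String) (apply_on_str : Option String) : Bool :=
  apply_on_str.isNone
    || decide (PySem.Str.len (apply_on_str.getD "") < 2)
    || PySem.Str.isIn (protocol ++ "-" ++ net) (apply_on_str.getD "")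

-- ===== PRECONDITION & SPEC =====
-- Pre_ excludes only inputs whose target protocol+'-'+net contains the separator ',' AND occurs
-- as a substring of apply_on_str: there A's per-segment scan answers False (no comma survives the
-- split) while B's whole-string test answers True; the target is malformed and either answer is
-- defensible.
def Pre_is_applicable (protocol : String) (net : String) (apply_on_str : Option String) : Prop :=
  ',' ∈ (protocol ++ "-" ++ net).toList →
    PySem.Str.isIn (protocol ++ "-" ++ net) (apply_on_str.getD "") = false

instance (protocol : String) (net : String) (apply_on_str : Option String) : Decidable (Pre_is_applicable protocol net apply_on_str) := by unfold Pre_is_applicable; infer_instance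

def pvWitness_is_applicable : String × String × Option String := ("vmess", "tun", some "vmess-tun,vless-tcp")

def Spec_is_applicable (protocol : String) (net : String) (apply_on_str : Option String) (out : Bool) : Prop := out = is_applicable_alt protocol net apply_on_str
instance (protocol : String) (net : String) (apply_on_str : Option String) (out : Bool) : Decidable (Spec_is_applicable protocol net apply_on_str out) := by unfold Spec_is_applicable; infer_instance

-- ===== CLAIM (what is proved, stated in full; the proofs are below) =====
def Claim_equal_is_applicable : Prop := ∀ (protocol : String) (net : String) (apply_on_str : Option String), Dom_is_applicable protocol net apply_on_str → Pre_is_applicable protocol net apply_on_str → Spec_is_applicable protocol net apply_on_str (is_applicable protocol net apply_on_str)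

-- ===== LEMMAS AND PROOFS =====

-- structural model of s.split(","): proof-only helper
def commaSplit : List Char → List (List Char)
  | [] => [[]]
  | c :: rest => if c = ',' then [] :: commaSplit rest else (commaSplit rest).modifyHead (c :: ·)

theorem commaSplit_ne_nil (s : List Char) : commaSplit s ≠ [] := by
  induction s with
  | nil => simp [commaSplit]
  | cons c rest ih =>
    simp only [commaSplit]
    split
    · simp
    · cases h : commaSplit rest with
      | nil => exact absurd h ih
      | cons p ps => simp [List.modifyHead]

theorem go_eq (fuel : Nat) : ∀ (l cur : List Char) (acc : List (List Char)),
    l.length ≤ fuel →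
    PySem.Chars.splitOn.go [','] fuel l cur acc
      = acc.reverse ++ (commaSplit l).modifyHead (cur.reverse ++ ·) := by
  induction fuel with
  | zero =>
    intro l cur acc hl
    have : l = [] := List.length_eq_zero_iff.mp (Nat.le_zero.mp hl)
    subst this
    simp [PySem.Chars.splitOn.go, commaSplit, List.modifyHead]
  | succ fuel ih =>
    intro l cur acc hl
    cases l with
    | nil => simp [PySem.Chars.splitOn.go, commaSplit, List.modifyHead]
    | cons c rest =>
      obtain ⟨p, ps, hps⟩ := List.exists_cons_of_ne_nil (commaSplit_ne_nil rest)
      by_cases hc : c = ','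
      · subst hc
        rw [PySem.Chars.splitOn.go]
        simp only [List.isPrefixOf, BEq.rfl, Bool.true_and, if_pos]
        rw [ih _ _ _ (by simpa using Nat.le_of_succ_le_succ (by simpa using hl))]
        simp [commaSplit, hps, List.modifyHead]
      · rw [PySem.Chars.splitOn.go]
        have hpre : [','].isPrefixOf (c :: rest) = false := by
          simp [List.isPrefixOf]
          exact fun h => absurd h.symm hc
        rw [hpre]
        simp only [Bool.false_eq_true, if_false]
        rw [ih _ _ _ (by simpa using Nat.le_of_succ_le_succ (by simpa using hl))]
        simp [commaSplit, hc, hps, List.modifyHead]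

theorem splitOn_comma (s : List Char) : PySem.Chars.splitOn s [','] = commaSplit s := by
  obtain ⟨p, ps, hps⟩ := List.exists_cons_of_ne_nil (commaSplit_ne_nil s)
  rw [PySem.Chars.splitOn, go_eq _ _ _ _ (by omega)]
  simp [hps, List.modifyHead]

theorem commaSplit_spec (s : List Char) :
    ∃ p ps, commaSplit s = p :: ps ∧ ',' ∉ p ∧
      ∃ t, s = p ++ t ∧ (t = [] ∨ ∃ t', t = ',' :: t') := by
  induction s with
  | nil => exact ⟨[], [], rfl, by simp, [], by simp⟩
  | cons c rest ih =>
    obtain ⟨p, ps, hps, hpc, t, hrest, ht⟩ := ih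
    by_cases hc : c = ','
    · subst hc
      exact ⟨[], commaSplit rest, by simp [commaSplit], by simp, ',' :: rest, rfl, Or.inr ⟨rest, rfl⟩⟩
    · refine ⟨c :: p, ps, ?_, ?_, t, by simp [hrest], ht⟩
      · simp [commaSplit, hc, hps, List.modifyHead]
      · simp [hpc]
        exact fun h => absurd h.symm hc

theorem commaSplit_no_comma (s : List Char) : ∀ p ∈ commaSplit s, ',' ∉ p := by
  induction s with
  | nil => simp [commaSplit]
  | cons c rest ih =>
    intro p hp
    by_cases hc : c = ','
    · subst hc
      rw [commaSplit, if_pos rfl] at hp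
      rcases List.mem_cons.mp hp with rfl | hp
      · simp
      · exact ih p hp
    · obtain ⟨q, qs, hqs⟩ := List.exists_cons_of_ne_nil (commaSplit_ne_nil rest)
      rw [commaSplit, if_neg hc, hqs] at hp
      simp only [List.modifyHead, List.mem_cons] at hp
      rcases hp with rfl | hp
      · intro h
        rcases List.mem_cons.mp h with h | h
        · exact hc h.symm
        · exact ih q (by simp [hqs]) h
      · exact ih p (by simp [hqs, hp])

theorem prefix_of_append_sep (sub u t : List Char) (hsub : ',' ∉ sub)
    (ht : t = [] ∨ ∃ t', t = ',' :: t') (h : sub <+: u ++ t) : sub <+: u := by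
  rcases ht with rfl | ⟨t', rfl⟩
  · simpa using h
  · have hlen : sub.length ≤ u.length := by
      by_contra hlt
      rw [not_le] at hlt
      obtain ⟨r, hr⟩ := h
      have h1 : (sub ++ r)[u.length]? = some ',' := by
        rw [hr]
        rw [List.getElem?_append_right (le_refl _)]
        simp
      rw [List.getElem?_append_left hlt] at h1
      exact hsub (List.mem_of_getElem? h1)
    exact List.prefix_of_prefix_length_le h (List.prefix_append u (',' :: t')) hlen

theorem infix_iff_commaSplit (sub : List Char) (hsub : ',' ∉ sub) :
    ∀ s, (sub <:+: s ↔ ∃ p ∈ commaSplit s, sub <:+: p) := by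
  intro s
  induction s with
  | nil => simp [commaSplit]
  | cons c rest ih =>
    by_cases hc : c = ','
    · subst hc
      have hpref : sub <+: ',' :: rest ↔ sub = [] := by
        constructor
        · intro h
          cases sub with
          | nil => rfl
          | cons x xs =>
            obtain ⟨r, hr⟩ := h
            simp only [List.cons_append] at hr
            have hx : x = ',' := (List.cons_eq_cons.mp hr).1
            exact absurd (hx ▸ List.mem_cons_self) hsub
        · rintro rfl; exact List.nil_prefix
      rw [List.infix_cons_iff, hpref, ih]
      simp [commaSplit]
    · obtain ⟨p, ps, hps, hpc, t, hrest, ht⟩ := commaSplit_spec rest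
      have hsplit : commaSplit (c :: rest) = (c :: p) :: ps := by
        simp [commaSplit, hc, hps, List.modifyHead]
      have hkey : sub <+: c :: rest ↔ sub <+: c :: p := by
        constructor
        · intro h
          exact prefix_of_append_sep sub (c :: p) t hsub ht (by simpa [hrest] using h)
        · intro h
          refine h.trans ?_
          exact ⟨t, by simp [hrest]⟩
      have hp_rest : p <:+: rest := ⟨[], t, by simp [hrest]⟩
      rw [hsplit]
      constructor
      · intro h
        rcases List.infix_cons_iff.mp h with h | h
        · exact ⟨c :: p, by simp, List.infix_cons_iff.mpr (Or.inl (hkey.mp h))⟩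
        · obtain ⟨q, hq, hiq⟩ := (ih).mp h
          rw [hps] at hq
          rcases List.mem_cons.mp hq with rfl | hq
          · exact ⟨c :: q, by simp, List.infix_cons_iff.mpr (Or.inr hiq)⟩
          · exact ⟨q, by simp [hq], hiq⟩
      · rintro ⟨q, hq, hiq⟩
        rcases List.mem_cons.mp hq with rfl | hq
        · rcases List.infix_cons_iff.mp hiq with h | h
          · exact List.infix_cons_iff.mpr (Or.inl (hkey.mpr h))
          · exact List.infix_cons_iff.mpr (Or.inr (h.trans hp_rest))
        · refine List.infix_cons_iff.mpr (Or.inr (ih.mpr ⟨q, ?_, hiq⟩))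
          rw [hps]; exact List.mem_cons.mpr (Or.inr hq)

theorem any_commaSplit (sub s : List Char) (hsub : ',' ∉ sub) :
    (commaSplit s).any (fun p => PySem.Chars.isIn sub p) = PySem.Chars.isIn sub s := by
  rw [Bool.eq_iff_iff, List.any_eq_true, PySem.Chars.isIn_iff_infix]
  rw [infix_iff_commaSplit sub hsub s]
  exact ⟨fun ⟨p, hp, h⟩ => ⟨p, hp, (PySem.Chars.isIn_iff_infix _ _).mp h⟩,
         fun ⟨p, hp, h⟩ => ⟨p, hp, (PySem.Chars.isIn_iff_infix _ _).mpr h⟩⟩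

-- ===== VERDICT (by name: the statement is the Claim_ definition above) =====
theorem is_applicable_spec : Claim_equal_is_applicable := by
  intro protocol net apply_on_str _ hpre
  unfold Spec_is_applicable is_applicable is_applicable_alt
  cases apply_on_str with
  | none => rfl
  | some s =>
    simp only [Option.isNone_some, Option.getD_some, Bool.false_or]
    by_cases hlen : PySem.Str.len s < 2
    · have h1 : s.length ≤ 1 := by simp [PySem.Str.len] at hlen; omega
      simp [h1]
    · simp only [hlen, decide_false, Bool.false_or, if_false]
      rw [PySem.Str.split?]
      have hsep : PySem.Chars.split? s.toList ",".toList
          = some (commaSplit s.toList) := by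
        rw [PySem.Chars.split?]
        simp [splitOn_comma]
      rw [hsep]
      simp only [Option.map_some, Option.getD_some, List.any_map, Function.comp_def]
      have hof : ∀ p : List Char,
          PySem.Str.isIn (protocol ++ "-" ++ net) (String.ofList p)
            = PySem.Chars.isIn (protocol ++ "-" ++ net).toList p := by
        intro p
        rw [PySem.Str.isIn_eq]
        simp
      simp only [hof]
      by_cases hcm : ',' ∈ (protocol ++ "-" ++ net).toList
      · -- comma-bearing target: Pre_ says it does not occur in s; both sides are false
        have hB : PySem.Str.isIn (protocol ++ "-" ++ net) s = false := by
          simpa using hpre hcm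
        rw [hB]
        rw [List.any_eq_false]
        intro p hp
        rw [Bool.not_eq_true, PySem.Chars.isIn_eq_false_iff]
        intro hinf
        exact commaSplit_no_comma s.toList p hp (hinf.mem hcm)
      · rw [any_commaSplit _ _ hcm, ← PySem.Str.isIn_eq]
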